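-- pv_equiv track=rewrite | github.com/simoncho1028/SME_Capstone_Team4 | src/config.py | generate_adjacent_charger_layouts
-- ===== SOURCE A (Python) =====
-- from typing import Dict, List
--
-- def generate_adjacent_charger_layouts(base_map: List[str]) -> List[List[str]]:
--     """
--     인접한 2개의 충전소에 대한 모든 가능한 배치 조합을 생성합니다.
--
--     Args:
--         base_map: 기본 주차장 맵 (충전소 없는 상태)
--
--     Returns:
--         가능한 모든 충전소 배치의 리스트
--     """
--     # 충전소 설치 가능한 위치 찾기 (일반 주차면 위치)
--     possible_spots = []
--     for i, row in enumerate(base_map):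
--         for j, cell in enumerate(row):
--             if cell == 'P':
--                 possible_spots.append((i, j))
--
--     # 인접한 위치 쌍 찾기
--     adjacent_pairs = []
--     for i, (r1, c1) in enumerate(possible_spots):
--         for r2, c2 in possible_spots[i+1:]:
--             # 상하좌우로 인접한 경우만 포함
--             if (abs(r1 - r2) == 1 and c1 == c2) or (r1 == r2 and abs(c1 - c2) == 1):
--                 adjacent_pairs.append(((r1, c1), (r2, c2)))
--
--     # 각 인접 쌍에 대해 새로운 레이아웃 생성
--     layouts = []
--     for pair in adjacent_pairs:
--         new_layout = [list(row) for row in base_map]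
--         for r, c in pair:
--             new_layout[r][c] = 'C'
--         layouts.append([''.join(row) for row in new_layout])
--
--     return layouts
-- ===== SOURCE B (Python) =====
-- from typing import List
--
--
-- def generate_adjacent_charger_layouts(base_map: List[str]) -> List[List[str]]:
--     """Same result: finds adjacent pairs in one pass via a set of spot
--     coordinates (check right/down neighbour of each spot in scan order)."""
--     spots = [(i, j) for i, row in enumerate(base_map)
--              for j, cell in enumerate(row) if cell == 'P']
--     spot_set = set(spots)
--     layouts = []
--     for (r, c) in spots:
--         if (r, c + 1) in spot_set:
--             layouts.append(_with_chargers(base_map, (r, c), (r, c + 1)))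
--         if (r + 1, c) in spot_set:
--             layouts.append(_with_chargers(base_map, (r, c), (r + 1, c)))
--     return layouts
--
--
-- def _with_chargers(base_map, a, b):
--     return [''.join('C' if (i, j) == a or (i, j) == b else ch
--                     for j, ch in enumerate(row))
--             for i, row in enumerate(base_map)]
-- ===== Notes on version B (the rewrite author's own statement) =====
-- stated objective: alternative
-- what changed: Pair finding is one pass over the spot list checking only the right/down neighbour against a hash set instead of testing all ordered spot pairs, and each layout is rebuilt by a single per-cell comprehension instead of copy-then-mutate.
import Mathlib
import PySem

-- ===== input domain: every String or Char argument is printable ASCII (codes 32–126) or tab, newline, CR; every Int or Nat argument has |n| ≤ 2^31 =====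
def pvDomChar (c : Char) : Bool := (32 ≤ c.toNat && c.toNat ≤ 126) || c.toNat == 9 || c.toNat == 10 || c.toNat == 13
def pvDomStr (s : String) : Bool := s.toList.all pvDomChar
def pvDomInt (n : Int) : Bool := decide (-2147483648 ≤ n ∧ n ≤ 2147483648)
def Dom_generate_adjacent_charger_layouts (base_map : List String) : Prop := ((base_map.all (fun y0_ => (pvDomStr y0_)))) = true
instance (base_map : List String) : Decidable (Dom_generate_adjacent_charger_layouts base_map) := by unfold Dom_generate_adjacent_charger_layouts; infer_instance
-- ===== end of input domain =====

-- B finds adjacent pairs in one pass via a spot set (right/down neighbour) instead of scanning all spot pairs,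
-- and rebuilds each layout per cell; proved to return exactly A's value on every input.


-- ===== PORT A =====
def generate_adjacent_charger_layouts (base_map : List String) : List (List String) :=
  let possible_spots : List (Int × Int) :=
    (PySem.List.enumerate base_map 0).foldl (fun acc p =>
      (PySem.List.enumerate p.2.toList 0).foldl (fun acc2 q =>
        if q.2 == 'P' then acc2 ++ [(p.1, q.1)] else acc2) acc) []
  let adjacent_pairs : List ((Int × Int) × (Int × Int)) :=
    (PySem.List.enumerate possible_spots 0).foldl (fun acc p =>
      (PySem.List.slice possible_spots (some (p.1 + 1)) none).foldl (fun acc2 q =>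
        if ((p.2.1 - q.1).natAbs == 1 && p.2.2 == q.2) || (p.2.1 == q.1 && (p.2.2 - q.2).natAbs == 1)
        then acc2 ++ [(p.2, q)] else acc2) acc) []
  adjacent_pairs.foldl (fun acc pair =>
    let new_layout : List (List Char) := base_map.map (fun row => row.toList)
    -- new_layout[r][c] = 'C' ; indices come from enumerate, always in range, so pyGetD/pySetD are exact here
    let new_layout2 := [pair.1, pair.2].foldl (fun g rc =>
      PySem.List.pySetD g rc.1 (PySem.List.pySetD (PySem.List.pyGetD g rc.1 []) rc.2 'C')) new_layout
    acc ++ [new_layout2.map (fun row => String.ofList row)]) []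

-- ===== PORT B =====
def pv_with_chargers (base_map : List String) (a b : Int × Int) : List String :=
  (PySem.List.enumerate base_map 0).map (fun p =>
    String.ofList ((PySem.List.enumerate p.2.toList 0).map (fun q =>
      if (p.1, q.1) == a || (p.1, q.1) == b then 'C' else q.2)))

def generate_adjacent_charger_layouts_alt (base_map : List String) : List (List String) :=
  let spots : List (Int × Int) :=
    (PySem.List.enumerate base_map 0).flatMap (fun p =>
      ((PySem.List.enumerate p.2.toList 0).filter (fun q => q.2 == 'P')).map (fun q => (p.1, q.1)))
  let spot_set : PySem.Set (Int × Int) := PySem.Set.ofList spots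
  spots.foldl (fun acc s =>
    let acc2 := if PySem.Set.contains spot_set (s.1, s.2 + 1) then acc ++ [pv_with_chargers base_map s (s.1, s.2 + 1)] else acc
    if PySem.Set.contains spot_set (s.1 + 1, s.2) then acc2 ++ [pv_with_chargers base_map s (s.1 + 1, s.2)] else acc2) []

-- ===== PRECONDITION & SPEC =====
def Spec_generate_adjacent_charger_layouts (base_map : List String) (out : List (List String)) : Prop := out = generate_adjacent_charger_layouts_alt base_map
instance (base_map : List String) (out : List (List String)) : Decidable (Spec_generate_adjacent_charger_layouts base_map out) := by unfold Spec_generate_adjacent_charger_layouts; infer_instance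

-- ===== CLAIM (what is proved, stated in full; the proofs are below) =====
def Claim_equal_generate_adjacent_charger_layouts : Prop := ∀ (base_map : List String), Dom_generate_adjacent_charger_layouts base_map → Spec_generate_adjacent_charger_layouts base_map (generate_adjacent_charger_layouts base_map)

-- ===== LEMMAS AND PROOFS =====

-- strict lexicographic order on coordinates; the spot list is produced in this order
def pvLex (a b : Int × Int) : Prop := a.1 < b.1 ∨ (a.1 = b.1 ∧ a.2 < b.2)

-- the canonical spot list (syntactically B's)
def pvSpots (base_map : List String) : List (Int × Int) :=
  (PySem.List.enumerate base_map 0).flatMap (fun p =>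
    ((PySem.List.enumerate p.2.toList 0).filter (fun q => q.2 == 'P')).map (fun q => (p.1, q.1)))

-- A's pair scan, expressed structurally on the spot list
def pvPairsRec : List (Int × Int) → List ((Int × Int) × (Int × Int))
  | [] => []
  | x :: xs => ((xs.filter (fun q => ((x.1 - q.1).natAbs == 1 && x.2 == q.2) || (x.1 == q.1 && (x.2 - q.2).natAbs == 1))).map (fun q => (x, q))) ++ pvPairsRec xs

lemma pvLex_ne {a b : Int × Int} (h : pvLex a b) : a ≠ b := by
  obtain ⟨a1,a2⟩ := a; obtain ⟨b1,b2⟩ := b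
  simp only [pvLex, Prod.mk.injEq, ne_eq, not_and] at *
  omega

lemma pvLex_trans {a b c : Int × Int} (h1 : pvLex a b) (h2 : pvLex b c) : pvLex a c := by
  obtain ⟨a1,a2⟩ := a; obtain ⟨b1,b2⟩ := b; obtain ⟨c1,c2⟩ := c
  simp only [pvLex] at *
  omega

lemma pvSpots_sorted (base_map : List String) : (pvSpots base_map).Pairwise pvLex := by
  unfold pvSpots
  rw [List.pairwise_flatMap]
  constructor
  · intro p _
    rw [List.pairwise_map]
    apply List.Pairwise.filter
    apply (PySem.List.pairwise_lt_enumerate p.2.toList 0).imp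
    intro a b h
    exact Or.inr ⟨rfl, h⟩
  · apply (PySem.List.pairwise_lt_enumerate base_map 0).imp
    intro a b h x hx y hy
    simp only [List.mem_map, List.mem_filter] at hx hy
    obtain ⟨qa, _, rfl⟩ := hx
    obtain ⟨qb, _, rfl⟩ := hy
    exact Or.inl h

lemma pvSpots_mem {base_map : List String} {s : Int × Int} (h : s ∈ pvSpots base_map) :
    ∃ (ri cj : Nat), s = ((ri : Int), (cj : Int)) ∧ ri < base_map.length ∧
      cj < (base_map.getD ri "").toList.length := by
  unfold pvSpots at h
  rw [List.mem_flatMap] at h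
  obtain ⟨p, hp, hs⟩ := h
  rw [PySem.List.mem_enumerate_iff] at hp
  obtain ⟨ri, hri, rfl⟩ := hp
  simp only [List.mem_map, List.mem_filter] at hs
  obtain ⟨q, ⟨hq, _⟩, rfl⟩ := hs
  rw [PySem.List.mem_enumerate_iff] at hq
  obtain ⟨cj, hcj, rfl⟩ := hq
  refine ⟨ri, cj, by simp, hri, ?_⟩
  simpa [List.getD, hri] using hcj

-- A's spots fold equals pvSpots
lemma pvSpotsA_eq (base_map : List String) :
    ((PySem.List.enumerate base_map 0).foldl (fun acc p =>
      (PySem.List.enumerate p.2.toList 0).foldl (fun acc2 q =>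
        if q.2 == 'P' then acc2 ++ [(p.1, q.1)] else acc2) acc) []) = pvSpots base_map := by
  unfold pvSpots
  have h : ∀ (acc : List (Int × Int)),
      ((PySem.List.enumerate base_map 0).foldl (fun acc p =>
        (PySem.List.enumerate p.2.toList 0).foldl (fun acc2 q =>
          if q.2 == 'P' then acc2 ++ [(p.1, q.1)] else acc2) acc) acc)
      = (PySem.List.enumerate base_map 0).foldl (fun acc p =>
          acc ++ ((PySem.List.enumerate p.2.toList 0).filter (fun q => q.2 == 'P')).map (fun q => (p.1, q.1))) acc := by
    intro acc
    apply PySem.List.foldl_congr_mem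
    intro a p _
    exact PySem.List.foldl_append_if _ _ _ _
  rw [h, PySem.List.foldl_append_eq_flatMap]
  simp

-- A's enumerate/slice pair scan equals the structural recursion
lemma pvPairsA_gen : ∀ (S pre : List (Int × Int)) (acc : List ((Int × Int) × (Int × Int))),
    ((PySem.List.enumerate S (pre.length : Int)).foldl (fun acc p =>
      (PySem.List.slice (pre ++ S) (some (p.1 + 1)) none).foldl (fun acc2 q =>
        if ((p.2.1 - q.1).natAbs == 1 && p.2.2 == q.2) || (p.2.1 == q.1 && (p.2.2 - q.2).natAbs == 1)
        then acc2 ++ [(p.2, q)] else acc2) acc) acc) = acc ++ pvPairsRec S := by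
  intro S
  induction S with
  | nil => intro pre acc; simp [PySem.List.enumerate_nil, pvPairsRec]
  | cons x xs ih =>
    intro pre acc
    rw [PySem.List.enumerate_cons]
    simp only [List.foldl_cons]
    have hs : ((pre.length : Int) + 1) = ((pre.length + 1 : Nat) : Int) := by push_cast; ring
    rw [hs, PySem.List.slice_from_natCast]
    have hd : (pre ++ x :: xs).drop (pre.length + 1) = xs := by
      rw [show pre.length + 1 = (pre ++ [x]).length by simp, show pre ++ x :: xs = (pre ++ [x]) ++ xs by simp,
        List.drop_left]
    rw [hd, PySem.List.foldl_append_if]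
    have hlen : ((pre.length + 1 : Nat) : Int) = ((pre ++ [x]).length : Int) := by simp
    rw [hlen, show pre ++ x :: xs = (pre ++ [x]) ++ xs by simp] at *
    rw [ih (pre ++ [x])]
    simp [pvPairsRec]

lemma pvPairsA_eq (S : List (Int × Int)) :
    ((PySem.List.enumerate S 0).foldl (fun acc p =>
      (PySem.List.slice S (some (p.1 + 1)) none).foldl (fun acc2 q =>
        if ((p.2.1 - q.1).natAbs == 1 && p.2.2 == q.2) || (p.2.1 == q.1 && (p.2.2 - q.2).natAbs == 1)
        then acc2 ++ [(p.2, q)] else acc2) acc) []) = pvPairsRec S := by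
  have := pvPairsA_gen S [] []
  simpa using this

-- on a lex-adjacent ordered pair, A's adjacency test picks exactly the right/down neighbour
lemma pvAdj_eq {x y : Int × Int} (h : pvLex x y) :
    (((x.1 - y.1).natAbs == 1 && x.2 == y.2) || (x.1 == y.1 && (x.2 - y.2).natAbs == 1))
      = (y == (x.1, x.2 + 1) || y == (x.1 + 1, x.2)) := by
  obtain ⟨x1,x2⟩ := x; obtain ⟨y1,y2⟩ := y
  simp only [pvLex] at h
  apply Bool.eq_iff_iff.mpr
  simp only [Bool.or_eq_true, Bool.and_eq_true, beq_iff_eq, Prod.mk.injEq]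
  omega

lemma pvFilterTwo : ∀ (L : List (Int × Int)), L.Pairwise pvLex → ∀ (a b : Int × Int), pvLex a b →
    L.filter (fun y => y == a || y == b) = (if a ∈ L then [a] else []) ++ (if b ∈ L then [b] else []) := by
  intro L
  induction L with
  | nil => intro _ a b _; simp
  | cons h t ih =>
    intro hp a b hab
    rw [List.pairwise_cons] at hp
    obtain ⟨hhead, htail⟩ := hp
    have ht := ih htail a b hab
    by_cases hha : h = a
    · have hna : a ∉ t := fun hm => pvLex_ne (hha ▸ hhead a hm) (hha ▸ rfl)
      have hnb : a ≠ b := pvLex_ne hab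
      simp only [List.filter_cons, List.mem_cons, ht]
      simp [hha, hna, Ne.symm hnb]
    · by_cases hhb : h = b
      · have hnb : b ∉ t := fun hm => pvLex_ne (hhb ▸ hhead b hm) (hhb ▸ rfl)
        have hna : a ∉ t := fun hm => pvLex_ne (pvLex_trans hab (hhb ▸ hhead a hm)) rfl
        have hne : a ≠ b := pvLex_ne hab
        simp only [List.filter_cons, List.mem_cons, ht]
        simp [hhb, hna, hnb, hne]
      · simp only [List.filter_cons, List.mem_cons, ht]
        simp [Ne.symm hha, Ne.symm hhb, hha, hhb]

lemma pvPairsRec_eq_neighbours : ∀ (S : List (Int × Int)), S.Pairwise pvLex →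
    pvPairsRec S = S.flatMap (fun s =>
      (if (s.1, s.2 + 1) ∈ S then [(s, (s.1, s.2 + 1))] else []) ++
      (if (s.1 + 1, s.2) ∈ S then [(s, (s.1 + 1, s.2))] else [])) := by
  intro S
  induction S with
  | nil => intro _; simp [pvPairsRec]
  | cons x xs ih =>
    intro hp
    rw [List.pairwise_cons] at hp
    obtain ⟨hhead, htail⟩ := hp
    rw [pvPairsRec, List.flatMap_cons]
    have hfc : xs.filter (fun q => ((x.1 - q.1).natAbs == 1 && x.2 == q.2) || (x.1 == q.1 && (x.2 - q.2).natAbs == 1))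
        = xs.filter (fun y => y == (x.1, x.2 + 1) || y == (x.1 + 1, x.2)) := by
      apply List.filter_congr
      intro y hy
      exact pvAdj_eq (hhead y hy)
    have hlex : pvLex (x.1, x.2 + 1) (x.1 + 1, x.2) := Or.inl (by omega)
    rw [hfc, pvFilterTwo xs htail _ _ hlex]
    have hr : ((x.1, x.2 + 1) ∈ x :: xs) ↔ ((x.1, x.2 + 1) ∈ xs) := by
      constructor
      · intro hm
        rcases List.mem_cons.mp hm with he | hm'
        · exact absurd he.symm (pvLex_ne (show pvLex x (x.1, x.2+1) from Or.inr ⟨rfl, by omega⟩))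
        · exact hm'
      · exact fun hm => List.mem_cons_of_mem _ hm
    have hd : ((x.1 + 1, x.2) ∈ x :: xs) ↔ ((x.1 + 1, x.2) ∈ xs) := by
      constructor
      · intro hm
        rcases List.mem_cons.mp hm with he | hm'
        · exact absurd he.symm (pvLex_ne (show pvLex x (x.1+1, x.2) from Or.inl (by omega)))
        · exact hm'
      · exact fun hm => List.mem_cons_of_mem _ hm
    have htailcong : xs.flatMap (fun s =>
        (if (s.1, s.2 + 1) ∈ xs then [(s, (s.1, s.2 + 1))] else []) ++
        (if (s.1 + 1, s.2) ∈ xs then [(s, (s.1 + 1, s.2))] else []))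
      = xs.flatMap (fun s =>
        (if (s.1, s.2 + 1) ∈ x :: xs then [(s, (s.1, s.2 + 1))] else []) ++
        (if (s.1 + 1, s.2) ∈ x :: xs then [(s, (s.1 + 1, s.2))] else [])) := by
      apply List.flatMap_congr
      intro s hs
      have h1 : ((s.1, s.2 + 1) ∈ x :: xs) ↔ ((s.1, s.2 + 1) ∈ xs) := by
        constructor
        · intro hm
          rcases List.mem_cons.mp hm with he | hm'
          · exact absurd he.symm
              (pvLex_ne (pvLex_trans (hhead s hs) (show pvLex s (s.1, s.2+1) from Or.inr ⟨rfl, by omega⟩)))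
          · exact hm'
        · exact fun hm => List.mem_cons_of_mem _ hm
      have h2 : ((s.1 + 1, s.2) ∈ x :: xs) ↔ ((s.1 + 1, s.2) ∈ xs) := by
        constructor
        · intro hm
          rcases List.mem_cons.mp hm with he | hm'
          · exact absurd he.symm
              (pvLex_ne (pvLex_trans (hhead s hs) (show pvLex s (s.1+1, s.2) from Or.inl (by omega))))
          · exact hm'
        · exact fun hm => List.mem_cons_of_mem _ hm
      simp only [h1, h2]
    rw [ih htail, htailcong]
    congr 1
    simp only [hr, hd, List.map_append]
    congr 1 <;> split_ifs <;> simp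

-- A's copy-and-mutate layout equals B's per-cell rebuild, for any two in-range cells
lemma pvLayout_gen (base_map : List String) (ra ca rb cb : Nat)
    (hra : ra < base_map.length) (hrb : rb < base_map.length) :
    ([((ra : Int), (ca : Int)), ((rb : Int), (cb : Int))].foldl (fun g rc =>
      PySem.List.pySetD g rc.1 (PySem.List.pySetD (PySem.List.pyGetD g rc.1 []) rc.2 'C'))
        (base_map.map (fun row => row.toList))).map (fun row => String.ofList row)
      = pv_with_chargers base_map ((ra : Int), (ca : Int)) ((rb : Int), (cb : Int)) := by
  unfold pv_with_chargers
  simp only [List.foldl_cons, List.foldl_nil, PySem.List.pySetD_natCast, PySem.List.pyGetD_natCast]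
  have hg0 : (base_map.map (fun row => row.toList)).getD ra [] = base_map[ra].toList := by
    rw [List.getD_eq_getElem _ _ (by simpa using hra)]; simp
  have hg1 : ((base_map.map (fun row => row.toList)).set ra (base_map[ra].toList.set ca 'C')).getD rb []
      = if ra = rb then base_map[ra].toList.set ca 'C' else base_map[rb].toList := by
    rw [List.getD_eq_getElem _ _ (by simpa using hrb), List.getElem_set]
    split_ifs <;> simp
  rw [hg0, hg1]
  apply List.ext_getElem
  · simp [PySem.List.length_enumerate]
  · intro k h1 h2
    simp only [List.getElem_map, PySem.List.getElem_enumerate, List.getElem_set]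
    simp only [List.length_map, List.length_set] at h1
    congr 1
    split_ifs with e1 e2 e3 <;> (try subst e1) <;> (try subst e2) <;> (try subst e3) <;>
      (apply List.ext_getElem (by simp [PySem.List.length_enumerate]);
       intro j hj1 hj2;
       simp only [List.getElem_map, PySem.List.getElem_enumerate, List.getElem_set];
       split_ifs <;>
         simp_all only [Bool.or_eq_true, beq_iff_eq, Prod.mk.injEq, Int.natCast_inj, zero_add,
           not_or, not_and] <;>
         (try first | rfl | omega | simp_all))
    all_goals (intro hcon; exfalso; rcases hcon with ⟨hx,-⟩|⟨hx,-⟩ <;> omega)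

lemma pvLayout_eq (base_map : List String) (a b : Int × Int)
    (ha : a ∈ pvSpots base_map) (hb : b ∈ pvSpots base_map) :
    ([a, b].foldl (fun g rc =>
      PySem.List.pySetD g rc.1 (PySem.List.pySetD (PySem.List.pyGetD g rc.1 []) rc.2 'C'))
        (base_map.map (fun row => row.toList))).map (fun row => String.ofList row)
      = pv_with_chargers base_map a b := by
  obtain ⟨ra, ca, rfl, hra, -⟩ := pvSpots_mem ha
  obtain ⟨rb, cb, rfl, hrb, -⟩ := pvSpots_mem hb
  exact pvLayout_gen base_map ra ca rb cb hra hrb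

lemma pvContains (S : List (Int × Int)) (x : Int × Int) :
    PySem.Set.contains (PySem.Set.ofList S) x = decide (x ∈ S) := by
  simp [pysem]

-- B unfolded to a flatMap of neighbour pairs, mapped through its layout builder
lemma pvAlt_eq (base_map : List String) :
    generate_adjacent_charger_layouts_alt base_map
      = ((pvSpots base_map).flatMap (fun s =>
          (if (s.1, s.2 + 1) ∈ pvSpots base_map then [(s, (s.1, s.2 + 1))] else []) ++
          (if (s.1 + 1, s.2) ∈ pvSpots base_map then [(s, (s.1 + 1, s.2))] else []))).map
        (fun pr => pv_with_chargers base_map pr.1 pr.2) := by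
  unfold generate_adjacent_charger_layouts_alt
  show (pvSpots base_map).foldl _ [] = _
  have hbody : ∀ (acc : List (List String)) (s : Int × Int),
      (let acc2 := if PySem.Set.contains (PySem.Set.ofList (pvSpots base_map)) (s.1, s.2 + 1) then acc ++ [pv_with_chargers base_map s (s.1, s.2 + 1)] else acc
       if PySem.Set.contains (PySem.Set.ofList (pvSpots base_map)) (s.1 + 1, s.2) then acc2 ++ [pv_with_chargers base_map s (s.1 + 1, s.2)] else acc2)
      = acc ++ ((if (s.1, s.2 + 1) ∈ pvSpots base_map then [pv_with_chargers base_map s (s.1, s.2 + 1)] else []) ++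
                (if (s.1 + 1, s.2) ∈ pvSpots base_map then [pv_with_chargers base_map s (s.1 + 1, s.2)] else [])) := by
    intro acc s
    simp only [pvContains]
    by_cases h1 : (s.1, s.2 + 1) ∈ pvSpots base_map <;> by_cases h2 : (s.1 + 1, s.2) ∈ pvSpots base_map <;>
      simp [h1, h2]
  calc (pvSpots base_map).foldl _ [] = (pvSpots base_map).foldl (fun acc s =>
        acc ++ ((if (s.1, s.2 + 1) ∈ pvSpots base_map then [pv_with_chargers base_map s (s.1, s.2 + 1)] else []) ++
                (if (s.1 + 1, s.2) ∈ pvSpots base_map then [pv_with_chargers base_map s (s.1 + 1, s.2)] else []))) [] := by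
        apply PySem.List.foldl_congr_mem
        intro acc s _
        exact hbody acc s
    _ = _ := by
        rw [PySem.List.foldl_append_eq_flatMap]
        simp [List.map_flatMap, List.map_append, apply_ite (List.map _)]

lemma pvA_eq (base_map : List String) :
    generate_adjacent_charger_layouts base_map
      = (pvPairsRec (pvSpots base_map)).map (fun pair =>
          ([pair.1, pair.2].foldl (fun g rc =>
            PySem.List.pySetD g rc.1 (PySem.List.pySetD (PySem.List.pyGetD g rc.1 []) rc.2 'C'))
              (base_map.map (fun row => row.toList))).map (fun row => String.ofList row)) := by
  unfold generate_adjacent_charger_layouts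
  simp only []
  rw [pvSpotsA_eq, pvPairsA_eq]
  have := PySem.List.foldl_append_singleton_eq_map (l := pvPairsRec (pvSpots base_map))
    (f := fun pair => ([pair.1, pair.2].foldl (fun g rc =>
            PySem.List.pySetD g rc.1 (PySem.List.pySetD (PySem.List.pyGetD g rc.1 []) rc.2 'C'))
              (base_map.map (fun row => row.toList))).map (fun row => String.ofList row)) (acc := [])
  simpa using this

-- ===== VERDICT (by name: the statement is the Claim_ definition above) =====
theorem generate_adjacent_charger_layouts_spec : Claim_equal_generate_adjacent_charger_layouts := by
  intro base_map _
  unfold Spec_generate_adjacent_charger_layouts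
  rw [pvA_eq, pvAlt_eq, pvPairsRec_eq_neighbours _ (pvSpots_sorted base_map)]
  apply List.map_congr_left
  intro pr hpr
  rw [List.mem_flatMap] at hpr
  obtain ⟨s, hs, hmem⟩ := hpr
  rw [List.mem_append] at hmem
  have h2 : pr.1 ∈ pvSpots base_map ∧ pr.2 ∈ pvSpots base_map := by
    rcases hmem with h | h <;>
      { split_ifs at h with hc
        · simp only [List.mem_singleton] at h
          subst h
          exact ⟨hs, hc⟩
        · simp at h }
  exact pvLayout_eq base_map pr.1 pr.2 h2.1 h2.2
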